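-- pv_equiv track=rewrite | github.com/Fungu/advent_of_code | aoc_2020_python/test.py | calculateHash
-- ===== SOURCE A (Python) =====
-- def calculateHash(decks):
--     ret = 0
--     mult = len(decks[0])
--     for i in range(len(decks[0])):
--         ret += decks[0][i] * mult
--         mult -= 1
--     ret2 = 0
--     mult = len(decks[1])
--     for i in range(len(decks[1])):
--         ret2 += decks[1][i] * mult
--         mult -= 1
--
--     return (ret, ret2)
-- ===== SOURCE B (Python) =====
-- def calculateHash(decks):
--     def weighted(deck):
--         prefixes = []
--         running = 0
--         for x in deck:
--             running += x
--             prefixes.append(running)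
--         return sum(prefixes)
--     first, second, *_ = decks
--     return (weighted(first), weighted(second))
-- ===== Notes on version B (the rewrite author's own statement) =====
-- stated objective: alternative
-- what changed: B replaces A's indexed countdown-multiplier loop (deck[i]*mult, mult decremented) by two staged passes: build the list of running prefix sums, then sum that list — correct because summing all prefix sums equals the weighted descending sum; no index, length or multiplier arithmetic remains.
import Mathlib
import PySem

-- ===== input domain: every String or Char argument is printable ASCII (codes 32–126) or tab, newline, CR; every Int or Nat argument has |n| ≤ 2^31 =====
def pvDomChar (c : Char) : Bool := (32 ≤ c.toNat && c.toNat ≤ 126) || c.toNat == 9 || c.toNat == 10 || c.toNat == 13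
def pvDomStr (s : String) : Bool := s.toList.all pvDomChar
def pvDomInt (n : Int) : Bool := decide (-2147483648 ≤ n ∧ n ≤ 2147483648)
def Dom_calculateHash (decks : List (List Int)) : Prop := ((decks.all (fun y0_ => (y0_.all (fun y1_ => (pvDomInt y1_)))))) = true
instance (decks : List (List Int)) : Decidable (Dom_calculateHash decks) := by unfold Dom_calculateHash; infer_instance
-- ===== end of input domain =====

-- B computes each deck's weighted descending sum in two staged passes (build the list of prefix sums, then sum it) instead of A's indexed countdown-multiplier loop (alternative decomposition, same cost); return value only.


-- ===== PORT A =====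
-- loop 'for i in range(len(d)): ret += d[i]*mult; mult -= 1' as a foldl over pyRange with state (ret, mult)
def calcA (d : List Int) : Int :=
  ((PySem.List.pyRange 0 (d.length : Int) 1).foldl
    (fun (s : Int × Int) i => (s.1 + (PySem.List.pyGet? d i).getD 0 * s.2, s.2 - 1))
    (0, (d.length : Int))).1

def calculateHash (decks : List (List Int)) : Int × Int :=
  (calcA ((PySem.List.pyGet? decks 0).getD []),
   calcA ((PySem.List.pyGet? decks 1).getD []))

-- ===== PORT B =====
-- 'prefixes = []; running = 0; for x in deck: running += x; prefixes.append(running)'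
def prefixesB (d : List Int) : List Int :=
  (d.foldl (fun (s : List Int × Int) x => (s.1 ++ [s.2 + x], s.2 + x)) ([], 0)).1

-- 'return sum(prefixes)'
def weightedB (d : List Int) : Int := (prefixesB d).sum

-- 'first, second, *_ = decks' raises ValueError on fewer than two decks (outside Pre_); ported by hand as a match, exact inside Pre_
def calculateHash_alt (decks : List (List Int)) : Int × Int :=
  match decks with
  | first :: second :: _ => (weightedB first, weightedB second)
  | _ => (0, 0)

-- ===== PRECONDITION & SPEC =====
-- Pre_ excludes exactly the inputs where A raises IndexError (and B ValueError): fewer than two decks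
def Pre_calculateHash (decks : List (List Int)) : Prop := 2 ≤ decks.length
instance (decks : List (List Int)) : Decidable (Pre_calculateHash decks) := by unfold Pre_calculateHash; infer_instance
def pvWitness_calculateHash : List (List Int) := [[1, 2, 3], [5]]

def Spec_calculateHash (decks : List (List Int)) (out : Int × Int) : Prop := out = calculateHash_alt decks
instance (decks : List (List Int)) (out : Int × Int) : Decidable (Spec_calculateHash decks out) := by unfold Spec_calculateHash; infer_instance

-- ===== CLAIM (what is proved, stated in full; the proofs are below) =====
def Claim_equal_calculateHash : Prop := ∀ (decks : List (List Int)), Dom_calculateHash decks → Pre_calculateHash decks → Spec_calculateHash decks (calculateHash decks)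

-- ===== LEMMAS AND PROOFS =====

-- the common mathematical value: wsum d m = d[0]*m + d[1]*(m-1) + …
def wsum : List Int → Int → Int
  | [], _ => 0
  | x :: t, m => x * m + wsum t (m - 1)

theorem calcA_foldl (d : List Int) (r m : Int) :
    (d.foldl (fun (s : Int × Int) x => (s.1 + x * s.2, s.2 - 1)) (r, m)).1 = r + wsum d m := by
  induction d generalizing r m with
  | nil => simp [wsum]
  | cons x t ih => simp [List.foldl, wsum, ih]; ring

theorem calcA_eq (d : List Int) : calcA d = wsum d d.length := by
  unfold calcA
  have h := PySem.List.foldl_pyRange_zero_pyGetD' d 0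
    (fun (s : Int × Int) (x : Int) => (s.1 + x * s.2, s.2 - 1)) ((0 : Int), (d.length : Int))
  simp only [PySem.List.pyGetD] at h
  rw [h, calcA_foldl]; ring

theorem prefixesB_foldl (d : List Int) (acc : List Int) (r : Int) :
    (d.foldl (fun (s : List Int × Int) x => (s.1 ++ [s.2 + x], s.2 + x)) (acc, r)).1.sum
      = acc.sum + (d.length : Int) * r + wsum d d.length := by
  induction d generalizing acc r with
  | nil => simp [wsum]
  | cons x t ih =>
    simp only [List.foldl, ih, List.sum_append, List.length_cons, wsum, List.sum_cons,
      List.sum_nil]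
    push_cast
    have : wsum t ((t.length : Int) + 1 - 1) = wsum t t.length := by norm_num
    rw [this]; ring

theorem weightedB_eq (d : List Int) : weightedB d = wsum d d.length := by
  unfold weightedB prefixesB
  rw [prefixesB_foldl]; simp

-- ===== VERDICT (by name: the statement is the Claim_ definition above) =====
theorem calculateHash_spec : Claim_equal_calculateHash := by
  intro decks _ hpre
  match decks with
  | first :: second :: rest =>
    unfold Spec_calculateHash calculateHash calculateHash_alt
    have h1 : PySem.List.pyGet? (first :: second :: rest) 0 = some first :=
      PySem.List.pyGet?_zero_cons _ _
    have h2 : PySem.List.pyGet? (first :: second :: rest) 1 = some second := by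
      have := PySem.List.pyGet?_cons_succ (x := first) (xs := second :: rest) (n := 0)
      simpa using this
    rw [h1, h2]
    simp only [Option.getD_some]
    rw [calcA_eq, calcA_eq, weightedB_eq, weightedB_eq]
  | [] => simp [Pre_calculateHash] at hpre
  | [d] => simp [Pre_calculateHash] at hpre
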